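-- pv_equiv track=rewrite | github.com/YeQ456/Python-Examples | 进阶/例269.寻找最长01子串.py | TheLongest01Substring
-- ===== SOURCE A (Python) =====
-- def TheLongest01Substring(str):
-- 	str += str
-- 	ans = 1
-- 	cnt = 1
-- 	for i in range(1, len(str)):
-- 		if str[i] != str[i - 1]:
-- 			cnt += 1
-- 		else:
-- 			cnt = 1
-- 		if ans < cnt and 2 * cnt <= len(str):
-- 			ans = cnt
-- 	return ans
-- ===== SOURCE B (Python) =====
-- def TheLongest01Substring(str):
--     n = len(str)
--     if n == 0:
--         return 0
--     runs = []
--     cur = 1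
--     for i in range(1, n):
--         if str[i] != str[i - 1]:
--             cur += 1
--         else:
--             runs.append(cur)
--             cur = 1
--     runs.append(cur)
--     best = max(runs)
--     if len(runs) >= 2 and str[0] != str[-1]:
--         best = max(best, runs[0] + runs[-1])
--     return min(n, best)
-- ===== Notes on version B (the rewrite author's own statement) =====
-- stated objective: faster
-- what changed: Instead of doubling the string and scanning 2n characters with a running capped maximum, B scans the original n characters once to build the table of maximal alternating-run lengths, takes its maximum, adds the circular wrap candidate runs[0]+runs[-1] when the string's ends differ and there are at least two runs, and caps with min(n, best) — halving the scanned input.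
-- intended difference: On the empty string A returns 1 (its initial accumulator, though no substring of length 1 exists), while B returns 0, the length of the longest substring of an empty string, which is the intended value. — e.g. on TheLongest01Substring(""): A returns 1, B returns 0
import Mathlib
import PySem

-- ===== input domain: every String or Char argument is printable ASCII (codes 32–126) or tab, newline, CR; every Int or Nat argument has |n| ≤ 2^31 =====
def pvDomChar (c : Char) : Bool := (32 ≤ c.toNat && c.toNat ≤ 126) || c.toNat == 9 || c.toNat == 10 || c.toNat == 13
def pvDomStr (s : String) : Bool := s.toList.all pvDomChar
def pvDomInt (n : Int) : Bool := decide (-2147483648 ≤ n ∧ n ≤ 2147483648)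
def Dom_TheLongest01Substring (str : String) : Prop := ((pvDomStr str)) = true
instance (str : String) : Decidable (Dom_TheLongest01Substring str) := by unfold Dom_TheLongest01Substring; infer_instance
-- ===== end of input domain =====

-- B replaces A's doubled-string scan by a run-length table over the original string plus an
-- explicit circular wrap candidate; return values only, no side effects.

-- ===== PORT A =====
def TheLongest01Substring (str : String) : Int :=
  let s := (str ++ str).toList
  ((PySem.List.pyRange 1 (s.length : Int) 1).foldl
    (fun (st : Int × Int) i =>
      let cnt := if PySem.List.pyGet? s i ≠ PySem.List.pyGet? s (i - 1) then st.2 + 1 else 1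
      let ans := if st.1 < cnt ∧ 2 * cnt ≤ (s.length : Int) then cnt else st.1
      (ans, cnt)) (1, 1)).1

-- ===== PORT B =====
def TheLongest01Substring_alt (str : String) : Int :=
  let s := str.toList
  let n : Int := (s.length : Int)
  if n = 0 then 0
  else
    let st := (PySem.List.pyRange 1 n 1).foldl
      (fun (st : List Int × Int) i =>
        if PySem.List.pyGet? s i ≠ PySem.List.pyGet? s (i - 1) then (st.1, st.2 + 1)
        else (st.1 ++ [st.2], 1)) ([], 1)
    let runs := st.1 ++ [st.2]
    let best := (PySem.List.max? runs (fun y => y)).getD 0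
    let best :=
      if 2 ≤ (runs.length : Int) ∧ PySem.List.pyGet? s 0 ≠ PySem.List.pyGet? s (-1) then
        max best ((PySem.List.pyGet? runs 0).getD 0 + (PySem.List.pyGet? runs (-1)).getD 0)
      else best
    min n best

-- ===== PRECONDITION & SPEC =====
-- On the empty string A returns 1 (its initial accumulator, though no substring of length 1
-- exists), while B returns 0, the length of the longest substring of "", the intended value.
def D_TheLongest01Substring (str : String) : Prop := str = ""
instance (str : String) : Decidable (D_TheLongest01Substring str) := by
  unfold D_TheLongest01Substring; infer_instance

def Spec_TheLongest01Substring (str : String) (out : Int) : Prop :=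
  ¬ D_TheLongest01Substring str → out = TheLongest01Substring_alt str
instance (str : String) (out : Int) : Decidable (Spec_TheLongest01Substring str out) := by
  unfold Spec_TheLongest01Substring; infer_instance

def pvDiffWitness_TheLongest01Substring : String := ""
def pvDiffWitnessOut_TheLongest01Substring : Int × Int := (1, 0)

-- ===== CLAIM (what is proved, stated in full; the proofs are below) =====
def Claim_unchanged_TheLongest01Substring : Prop := ∀ (str : String), Dom_TheLongest01Substring str → Spec_TheLongest01Substring str (TheLongest01Substring str)
def Claim_changed_TheLongest01Substring : Prop := Dom_TheLongest01Substring (pvDiffWitness_TheLongest01Substring) ∧ D_TheLongest01Substring (pvDiffWitness_TheLongest01Substring) ∧ TheLongest01Substring (pvDiffWitness_TheLongest01Substring) = pvDiffWitnessOut_TheLongest01Substring.1 ∧ TheLongest01Substring_alt (pvDiffWitness_TheLongest01Substring) = pvDiffWitnessOut_TheLongest01Substring.2 ∧ pvDiffWitnessOut_TheLongest01Substring.1 ≠ pvDiffWitnessOut_TheLongest01Substring.2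
def Claim_exact_TheLongest01Substring : Prop := ∀ (str : String), Dom_TheLongest01Substring str → D_TheLongest01Substring str → TheLongest01Substring str ≠ TheLongest01Substring_alt str

-- ===== LEMMAS AND PROOFS =====

-- maximal alternating run lengths of (p :: cs), with the first run already cur long
def runsAux : List Char → Char → Int → List Int
  | [], _, cur => [cur]
  | c :: cs, p, cur => if c ≠ p then runsAux cs c (cur + 1) else cur :: runsAux cs c 1

-- structural form of a 'for i in range(1, len(l))' loop reading l[i] and l[i-1]
def adjFold {σ : Type} (g : σ → Option Char → Option Char → σ) : Char → List Char → σ → σ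
  | _, [], st => st
  | p, c :: cs, st => adjFold g c cs (g st (some c) (some p))

theorem runsAux_ne_nil (cs : List Char) (c : Char) (cur : Int) : runsAux cs c cur ≠ [] := by
  induction cs generalizing c cur with
  | nil => simp [runsAux]
  | cons x xs ih => simp only [runsAux]; split <;> simp [ih]

theorem adjFold_eq_idxFold {σ : Type} (g : σ → Option Char → Option Char → σ)
    (l pre : List Char) (c : Char) (cs : List Char) (st : σ)
    (h : l = pre ++ c :: cs) :
    (PySem.List.pyRange ((pre.length : Int) + 1) (l.length : Int) 1).foldl
      (fun st i => g st (PySem.List.pyGet? l i) (PySem.List.pyGet? l (i - 1))) st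
    = adjFold g c cs st := by
  induction cs generalizing pre c st with
  | nil =>
    subst h
    rw [PySem.List.pyRange_one_eq_nil (by simp)]
    simp [adjFold]
  | cons c' cs' ih =>
    subst h
    rw [PySem.List.pyRange_one_cons
      (by simp only [List.length_append, List.length_cons]; push_cast; omega)]
    simp only [List.foldl_cons, adjFold]
    have h1 : PySem.List.pyGet? (pre ++ c :: c' :: cs') ((pre.length : Int) + 1 - 1)
        = some c := by
      simp [PySem.List.pyGet?_natCast]
    have h2 : PySem.List.pyGet? (pre ++ c :: c' :: cs') ((pre.length : Int) + 1)
        = some c' := by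
      have e1 : ((pre.length : Int) + 1) = ((pre ++ [c]).length : Int) := by simp
      have e2 : pre ++ c :: c' :: cs' = (pre ++ [c]) ++ c' :: cs' := by simp
      rw [e1, e2, PySem.List.pyGet?_natCast]
      simp
    rw [h1, h2]
    have key := ih (pre ++ [c]) c' (g st (some c') (some c)) (by simp)
    simp only [List.length_append, List.length_cons, List.length_nil] at key ⊢
    convert key using 4

-- running maximum of a nonempty list (0 for [])
def maxNE : List Int → Int
  | [] => 0
  | h :: t => t.foldl max h

-- A's loop body and B's loop body, as functions of the two optional characters read
def gA (N : Int) (st : Int × Int) (oc op : Option Char) : Int × Int :=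
  let cnt := if oc ≠ op then st.2 + 1 else 1
  let ans := if st.1 < cnt ∧ 2 * cnt ≤ N then cnt else st.1
  (ans, cnt)

def gB (st : List Int × Int) (oc op : Option Char) : List Int × Int :=
  if oc ≠ op then (st.1, st.2 + 1) else (st.1 ++ [st.2], 1)

theorem adjFold_eq_idxFold0 {σ : Type} (g : σ → Option Char → Option Char → σ)
    (c : Char) (cs : List Char) (st : σ) :
    (PySem.List.pyRange 1 (((c :: cs : List Char).length : Int)) 1).foldl
      (fun st i => g st (PySem.List.pyGet? (c :: cs) i) (PySem.List.pyGet? (c :: cs) (i - 1))) st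
    = adjFold g c cs st := by
  have h := adjFold_eq_idxFold g (c :: cs) [] c cs st rfl
  simp only [List.length_nil, Nat.cast_zero, zero_add] at h
  exact h

theorem portA_gA (str : String) :
    TheLongest01Substring str
      = ((PySem.List.pyRange 1 (((str ++ str).toList.length : Int)) 1).foldl
          (fun st i => gA (((str ++ str).toList.length : Int)) st
            (PySem.List.pyGet? (str ++ str).toList i)
            (PySem.List.pyGet? (str ++ str).toList (i - 1))) (1, 1)).1 := rfl

theorem portB_gB (str : String) :
    TheLongest01Substring_alt str =
      (if (str.toList.length : Int) = 0 then 0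
       else
         let st := (PySem.List.pyRange 1 (str.toList.length : Int) 1).foldl
           (fun st i => gB st (PySem.List.pyGet? str.toList i) (PySem.List.pyGet? str.toList (i - 1)))
           ([], 1)
         let runs := st.1 ++ [st.2]
         let best := (PySem.List.max? runs (fun y => y)).getD 0
         let best :=
           if 2 ≤ (runs.length : Int) ∧
               PySem.List.pyGet? str.toList 0 ≠ PySem.List.pyGet? str.toList (-1) then
             max best ((PySem.List.pyGet? runs 0).getD 0 + (PySem.List.pyGet? runs (-1)).getD 0)
           else best
         min (str.toList.length : Int) best) := rfl

theorem foldl_max_max (t : List Int) : ∀ a b : Int, t.foldl max (max a b) = max a (t.foldl max b) := by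
  induction t with
  | nil => intro a b; rfl
  | cons c t ih =>
    intro a b
    simp only [List.foldl_cons, max_assoc]
    exact ih a (max b c)

theorem maxNE_cons (x : Int) (l : List Int) (h : l ≠ []) : maxNE (x :: l) = max x (maxNE l) := by
  cases l with
  | nil => simp at h
  | cons y t =>
    simp only [maxNE, List.foldl_cons]
    exact foldl_max_max t x y

theorem mem_le_maxNE (l : List Int) (x : Int) (hx : x ∈ l) : x ≤ maxNE l := by
  cases l with
  | nil => simp at hx
  | cons y t =>
    rcases List.mem_cons.mp hx with rfl | hx
    · exact (PySem.List.le_foldl_max t x).1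
    · exact (PySem.List.le_foldl_max t y).2 x hx

theorem maxNE_mem (l : List Int) (h : l ≠ []) : maxNE l ∈ l := by
  cases l with
  | nil => simp at h
  | cons y t =>
    rcases PySem.List.foldl_max_mem t y with he | he
    · simp only [maxNE, he]; exact List.mem_cons_self
    · exact List.mem_cons_of_mem _ he

theorem maxNE_map_min (n : Int) (l : List Int) (h : l ≠ []) :
    maxNE (l.map (fun r => min n r)) = min n (maxNE l) := by
  induction l with
  | nil => simp at h
  | cons x t ih =>
    cases t with
    | nil => simp [maxNE]
    | cons y t' =>
      rw [List.map_cons, maxNE_cons _ _ (by simp), maxNE_cons _ _ (by simp), ih (by simp)]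
      omega

theorem runsAux_pos (cs : List Char) (c : Char) (cur : Int) (hc : 1 ≤ cur) :
    ∀ x ∈ runsAux cs c cur, 1 ≤ x := by
  induction cs generalizing c cur with
  | nil => intro x hx; simp [runsAux] at hx; omega
  | cons c' cs' ih =>
    intro x hx
    simp only [runsAux] at hx
    split at hx
    · exact ih c' (cur + 1) (by omega) x hx
    · rcases List.mem_cons.mp hx with rfl | hx
      · omega
      · exact ih c' 1 (by omega) x hx

theorem runsAux_exists_ge (cs : List Char) (c : Char) (cur : Int) :
    ∃ x ∈ runsAux cs c cur, cur ≤ x := by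
  induction cs generalizing c cur with
  | nil => exact ⟨cur, by simp [runsAux]⟩
  | cons c' cs' ih =>
    simp only [runsAux]
    split
    · obtain ⟨x, hm, hx⟩ := ih c' (cur + 1)
      exact ⟨x, hm, by omega⟩
    · exact ⟨cur, List.mem_cons_self, le_refl _⟩

theorem runsAux_shift (cs : List Char) (c : Char) (cur k : Int) :
    runsAux cs c (cur + k) = ((runsAux cs c cur).headD 0 + k) :: (runsAux cs c cur).tail := by
  induction cs generalizing c cur with
  | nil => simp [runsAux]
  | cons c' cs' ih =>
    simp only [runsAux]
    split
    · have h : cur + k + 1 = (cur + 1) + k := by ring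
      rw [h, ih]
    · simp

theorem runsAux_sum (cs : List Char) (c : Char) (cur : Int) :
    (runsAux cs c cur).sum = cur + (cs.length : Int) := by
  induction cs generalizing c cur with
  | nil => simp [runsAux]
  | cons c' cs' ih =>
    simp only [runsAux]
    split
    · rw [ih]; push_cast [List.length_cons]; ring
    · simp only [List.sum_cons, ih]; push_cast [List.length_cons]; ring

theorem getLastD_eq_getLast {α : Type} (l : List α) (d : α) (h : l ≠ []) :
    l.getLastD d = l.getLast h := by
  rw [List.getLastD_eq_getLast?, List.getLast?_eq_some_getLast h]
  rfl

theorem getLastD_mem {α : Type} (l : List α) (d : α) (h : l ≠ []) : l.getLastD d ∈ l := by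
  rw [getLastD_eq_getLast l d h]
  exact List.getLast_mem h

theorem dropLast_append_getLastD (l : List Int) (h : l ≠ []) :
    l.dropLast ++ [l.getLastD 0] = l := by
  rw [getLastD_eq_getLast l 0 h]
  exact List.dropLast_concat_getLast h

theorem runsAux_append (xs ys : List Char) (p : Char) (cur : Int) :
    runsAux (xs ++ ys) p cur
      = (runsAux xs p cur).dropLast
        ++ runsAux ys ((p :: xs).getLastD p) ((runsAux xs p cur).getLastD 0) := by
  induction xs generalizing p cur with
  | nil => simp [runsAux]
  | cons x xs' ih =>
    simp only [List.cons_append, runsAux]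
    split_ifs with hxp
    · rw [ih]
      simp only [List.getLastD_cons]
    · rw [ih]
      obtain ⟨r, t, hR⟩ := List.exists_cons_of_ne_nil (runsAux_ne_nil xs' x 1)
      rw [hR]
      simp only [List.getLastD_cons, List.dropLast_cons₂, List.cons_append]

theorem scanA_eval (n : Int) (hn : 1 ≤ n) :
    ∀ (cs : List Char) (c : Char) (ans cnt : Int), 1 ≤ cnt → min cnt n ≤ ans →
      (adjFold (gA (2 * n)) c cs (ans, cnt)).1
        = max ans (maxNE ((runsAux cs c cnt).map (fun r => min n r))) := by
  intro cs
  induction cs with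
  | nil =>
    intro c ans cnt h1 h2
    simp only [adjFold, runsAux, List.map_cons, List.map_nil, maxNE, List.foldl_nil]
    omega
  | cons c' cs' ih =>
    intro c ans cnt h1 h2
    simp only [adjFold, runsAux, gA, ne_eq, Option.some.injEq]
    by_cases hne : c' = c
    · -- equal neighbouring characters: cnt resets to 1, ans unchanged
      simp only [hne, not_true_eq_false, if_false]
      rw [if_neg (by omega : ¬ (ans < 1 ∧ 2 * 1 ≤ 2 * n))]
      rw [ih c ans 1 (by omega) (by omega)]
      rw [List.map_cons, maxNE_cons _ _ (by simp [runsAux_ne_nil])]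
      omega
    · -- distinct neighbouring characters: cnt increments
      simp only [hne, not_false_eq_true, if_true]
      by_cases hupd : ans < cnt + 1 ∧ 2 * (cnt + 1) ≤ 2 * n
      · rw [if_pos hupd, ih c' (cnt + 1) (cnt + 1) (by omega) (by omega)]
        obtain ⟨x, hm, hx⟩ := runsAux_exists_ge cs' c' (cnt + 1)
        have hX := mem_le_maxNE _ _ (List.mem_map_of_mem (f := fun r => min n r) hm)
        simp only at hX
        omega
      · rw [if_neg hupd, ih c' ans (cnt + 1) (by omega) (by omega)]

theorem scanB_eval :
    ∀ (cs : List Char) (c : Char) (rs : List Int) (cur : Int),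
      adjFold gB c cs (rs, cur)
        = (rs ++ (runsAux cs c cur).dropLast, (runsAux cs c cur).getLastD 0) := by
  intro cs
  induction cs with
  | nil => intro c rs cur; simp [adjFold, runsAux]
  | cons c' cs' ih =>
    intro c rs cur
    simp only [adjFold, gB, runsAux, ne_eq, Option.some.injEq]
    by_cases hne : c' = c
    · simp only [hne, not_true_eq_false, if_false]
      rw [ih]
      obtain ⟨r, t, hR⟩ := List.exists_cons_of_ne_nil (runsAux_ne_nil cs' c 1)
      rw [hR]
      simp [List.dropLast_cons₂]
    · simp only [hne, not_false_eq_true, if_true]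
      rw [ih]

theorem combine_eq (n : Int) (hn : 1 ≤ n) (R : List Int) (hRne : R ≠ [])
    (hpos : ∀ x ∈ R, 1 ≤ x) :
    max 1 (min n (maxNE (R.dropLast ++ R.getLastD 0 :: R))) = min n (maxNE R) := by
  have hsub : ∀ x ∈ R.dropLast ++ R.getLastD 0 :: R, x ∈ R := by
    intro x hx
    rcases List.mem_append.mp hx with hx | hx
    · exact (List.dropLast_sublist R).subset hx
    · rcases List.mem_cons.mp hx with rfl | hx
      · exact getLastD_mem R 0 hRne
      · exact hx
  have hDR : maxNE (R.dropLast ++ R.getLastD 0 :: R) = maxNE R := by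
    apply le_antisymm
    · exact mem_le_maxNE R _ (hsub _ (maxNE_mem _ (by simp)))
    · exact mem_le_maxNE _ _ (List.mem_append_right _ (List.mem_cons_of_mem _ (maxNE_mem R hRne)))
  have h1 : 1 ≤ maxNE R := hpos _ (maxNE_mem R hRne)
  rw [hDR]
  omega

theorem combine_ne (n : Int) (hn : 1 ≤ n) (R : List Int) (hRne : R ≠ [])
    (hpos : ∀ x ∈ R, 1 ≤ x) (hsum : R.sum = n) :
    max 1 (min n (maxNE (R.dropLast ++ (R.headD 0 + R.getLastD 0) :: R.tail)))
      = min n (if 2 ≤ (R.length : Int)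
          then max (maxNE R) (R.headD 0 + R.getLastD 0) else maxNE R) := by
  cases R with
  | nil => simp at hRne
  | cons r t =>
    cases t with
    | nil =>
      simp only [List.sum_cons, List.sum_nil] at hsum
      rw [if_neg (by simp)]
      show max 1 (min n (maxNE [r + r])) = min n (maxNE [r])
      simp only [maxNE, List.foldl_nil]
      omega
    | cons y t' =>
      rw [if_pos (by push_cast [List.length_cons]; omega)]
      have he1 : 1 ≤ (r :: y :: t').getLastD 0 :=
        hpos _ (getLastD_mem _ 0 (by simp))
      have hmax1 : 1 ≤ maxNE (r :: y :: t') := hpos _ (maxNE_mem _ (by simp))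
      have hD : maxNE ((r :: y :: t').dropLast ++ (r + (r :: y :: t').getLastD 0) :: (y :: t'))
          = max (maxNE (r :: y :: t')) (r + (r :: y :: t').getLastD 0) := by
        apply le_antisymm
        · have hmemD := maxNE_mem ((r :: y :: t').dropLast
            ++ (r + (r :: y :: t').getLastD 0) :: (y :: t')) (by simp)
          rcases List.mem_append.mp hmemD with hx | hx
          · exact le_max_of_le_left (mem_le_maxNE _ _ ((List.dropLast_sublist _).subset hx))
          · rcases List.mem_cons.mp hx with hx | hx
            · rw [hx]; exact le_max_right _ _
            · exact le_max_of_le_left (mem_le_maxNE _ _ (List.mem_cons_of_mem _ hx))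
        · apply max_le
          · rcases List.mem_cons.mp (maxNE_mem (r :: y :: t') (by simp)) with hx | hx
            · calc maxNE (r :: y :: t') = r := hx
                _ ≤ r + (r :: y :: t').getLastD 0 := by omega
                _ ≤ _ := mem_le_maxNE _ _ (List.mem_append_right _ List.mem_cons_self)
            · exact mem_le_maxNE _ _ (List.mem_append_right _ (List.mem_cons_of_mem _ hx))
          · exact mem_le_maxNE _ _ (List.mem_append_right _ List.mem_cons_self)
      simp only [List.headD_cons, List.tail_cons]
      rw [hD]
      omega

theorem main_eq (str : String) (c : Char) (cs : List Char) (hl : str.toList = c :: cs) :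
    TheLongest01Substring str = TheLongest01Substring_alt str := by
  have hdl : (str ++ str).toList = c :: (cs ++ c :: cs) := by
    rw [String.toList_append, hl]; simp
  have hn : 1 ≤ (((c :: cs : List Char)).length : Int) := by
    push_cast [List.length_cons]; omega
  have hRne := runsAux_ne_nil cs c 1
  have hpos := runsAux_pos cs c 1 (by omega)
  -- A's side: doubled-string scan reduced to a capped run-table maximum
  rw [portA_gA, hdl, adjFold_eq_idxFold0]
  have hN : (((c :: (cs ++ c :: cs) : List Char)).length : Int)
      = 2 * (((c :: cs : List Char)).length : Int) := by
    push_cast [List.length_cons, List.length_append]; ring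
  rw [hN, scanA_eval _ hn (cs ++ c :: cs) c 1 1 (by omega) (by omega)]
  rw [runsAux_append]
  -- B's side: run-table construction
  rw [portB_gB, hl, if_neg (by omega), adjFold_eq_idxFold0, scanB_eval]
  dsimp only
  rw [List.nil_append, dropLast_append_getLastD _ hRne]
  have hbest : (PySem.List.max? (runsAux cs c 1) (fun y => y)).getD 0 = maxNE (runsAux cs c 1) := by
    obtain ⟨r, t, hRrt⟩ := List.exists_cons_of_ne_nil hRne
    rw [hRrt, PySem.List.max?_id_cons]; rfl
  have hR0 : (PySem.List.pyGet? (runsAux cs c 1) 0).getD 0 = (runsAux cs c 1).headD 0 := by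
    obtain ⟨r, t, hRrt⟩ := List.exists_cons_of_ne_nil hRne
    rw [hRrt, PySem.List.pyGet?_zero_cons]; rfl
  have hRlast : (PySem.List.pyGet? (runsAux cs c 1) (-1)).getD 0 = (runsAux cs c 1).getLastD 0 := by
    rw [PySem.List.pyGet?_neg_one, List.getLastD_eq_getLast?]
  have hlast : PySem.List.pyGet? (c :: cs) (-1) = some ((c :: cs).getLastD c) := by
    rw [PySem.List.pyGet?_neg_one, List.getLast?_eq_some_getLast (by simp),
      getLastD_eq_getLast _ c (by simp : (c :: cs : List Char) ≠ [])]
  rw [hbest, hR0, hRlast, hlast, PySem.List.pyGet?_zero_cons]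
  -- unfold the wrap run of A's doubled string
  simp only [runsAux, ne_eq, Option.some.injEq]
  by_cases hcp : c = (c :: cs).getLastD c
  · rw [if_neg (not_not_intro hcp), if_neg (fun h => h.2 hcp)]
    rw [maxNE_map_min _ _ (by simp)]
    exact combine_eq _ hn _ hRne hpos
  · have hcond : (2 ≤ (((runsAux cs c 1).length : Nat) : Int) ∧ ¬ c = (c :: cs).getLastD c)
        = (2 ≤ (((runsAux cs c 1).length : Nat) : Int)) := by
      simp only [hcp, not_false_eq_true, and_true]
    rw [if_pos hcp]
    simp only [hcond]
    have hsh : runsAux cs c ((runsAux cs c 1).getLastD 0 + 1)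
        = ((runsAux cs c 1).headD 0 + (runsAux cs c 1).getLastD 0) :: (runsAux cs c 1).tail := by
      rw [show (runsAux cs c 1).getLastD 0 + 1 = 1 + (runsAux cs c 1).getLastD 0 by ring,
        runsAux_shift]
    rw [hsh, maxNE_map_min _ _ (by simp)]
    have hsum : (runsAux cs c 1).sum = (((c :: cs : List Char)).length : Int) := by
      rw [runsAux_sum]; push_cast [List.length_cons]; ring
    exact combine_ne _ hn _ hRne hpos hsum

-- ===== VERDICT (by name: the statement is the Claim_ definition above) =====
theorem TheLongest01Substring_spec : Claim_unchanged_TheLongest01Substring := by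
  intro str _
  unfold Spec_TheLongest01Substring
  intro hD
  cases h : str.toList with
  | nil => exact absurd (String.toList_eq_nil_iff.mp h) hD
  | cons c cs => exact main_eq str c cs h

theorem TheLongest01Substring_changed : Claim_changed_TheLongest01Substring := by
  unfold Claim_changed_TheLongest01Substring; decide

theorem TheLongest01Substring_tight : Claim_exact_TheLongest01Substring := by
  intro str _ hD
  unfold D_TheLongest01Substring at hD
  subst hD
  decide
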